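-- pv_equiv track=rewrite | github.com/Allanimated/Codility- | Lesson_1/solution.py | solution_chatGPT
-- ===== SOURCE A (Python) =====
-- def solution_chatGPT(N):
--     # Convert integer N to binary representation
--     binary_str = bin(N)[2:]
--
--     # Initialize variables to track the longest binary gap and the current binary gap length
--     max_gap_length = 0
--     current_gap_length = 0
--
--     # Iterate through the binary string
--     for digit in binary_str:
--         if digit == '0':
--             # Increment current gap length if the current digit is '0'
--             current_gap_length += 1
--         else:
--             # Update max gap length if the current gap is greater
--             max_gap_length = max(max_gap_length, current_gap_length)
--             # Reset current gap length
--             current_gap_length = 0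
--
--     return max_gap_length
-- ===== SOURCE B (Python) =====
-- def solution_chatGPT(N):
--     # Staged decomposition: collect the positions of all non-'0' characters of
--     # bin(N)[2:], then the answer is the largest distance-minus-one between
--     # consecutive such positions (no running counter, no max-update scan).
--     s = bin(N)[2:]
--     ones = [i for i, ch in enumerate(s) if ch != '0']
--     return max((j - i - 1 for i, j in zip(ones, ones[1:])), default=0)
-- ===== Notes on version B (the rewrite author's own statement) =====
-- stated objective: alternative
-- what changed: B replaces A's running-counter scan (current/max gap accumulator updated per character) with a staged decomposition: it first collects the index positions of all non-'0' characters of bin(N)[2:] and then reduces the pairwise differences of consecutive positions (j - i - 1) with max.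
import Mathlib
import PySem

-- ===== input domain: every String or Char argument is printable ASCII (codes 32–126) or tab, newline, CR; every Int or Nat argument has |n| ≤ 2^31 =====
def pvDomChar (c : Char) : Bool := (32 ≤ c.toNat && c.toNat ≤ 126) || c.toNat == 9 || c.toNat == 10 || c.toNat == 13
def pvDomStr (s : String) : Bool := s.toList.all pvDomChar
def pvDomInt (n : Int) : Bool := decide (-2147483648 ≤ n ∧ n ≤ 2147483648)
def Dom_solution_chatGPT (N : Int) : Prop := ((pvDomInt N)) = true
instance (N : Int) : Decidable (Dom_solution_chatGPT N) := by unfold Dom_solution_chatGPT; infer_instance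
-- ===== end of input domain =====

-- B replaces A's running-counter scan with a staged decomposition (positions of
-- non-'0' chars, then max of consecutive-position differences); objective: alternative.

-- ===== PORT A =====
-- A's loop body: '0' extends the current gap, anything else closes it
def pvStepA (st : Int × Int) (digit : Char) : Int × Int :=
  if digit = '0' then (st.1, st.2 + 1) else (max st.1 st.2, 0)

def solution_chatGPT (N : Int) : Int :=
  let binary_str := PySem.List.slice (PySem.Int.toBinChars0b N) (some 2) none   -- bin(N)[2:]
  let st := binary_str.foldl pvStepA ((0 : Int), (0 : Int))
  st.1

-- ===== PORT B =====
def solution_chatGPT_alt (N : Int) : Int :=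
  let s := PySem.List.slice (PySem.Int.toBinChars0b N) (some 2) none            -- bin(N)[2:]
  let ones := ((PySem.List.enumerate s).filter (fun p => p.2 != '0')).map (fun p => p.1)
  -- zip(ones, ones[1:]); max(..., default=0): gaps are Python ints, PySem.List.maxD is max(xs, default)
  let gaps := (ones.zip (PySem.List.slice ones (some 1) none)).map (fun q => q.2 - q.1 - 1)
  PySem.List.maxD gaps id 0

-- ===== PRECONDITION & SPEC =====
def Spec_solution_chatGPT (N : Int) (out : Int) : Prop := out = solution_chatGPT_alt N
instance (N : Int) (out : Int) : Decidable (Spec_solution_chatGPT N out) := by unfold Spec_solution_chatGPT; infer_instance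

-- ===== CLAIM =====
def Claim_equal_solution_chatGPT : Prop := ∀ (N : Int), Dom_solution_chatGPT N → Spec_solution_chatGPT N (solution_chatGPT N)

-- ===== LEMMAS AND PROOFS =====

-- positions (starting at k) of the non-'0' chars of cs — B's 'ones' list with a general start
def pvOnes (k : Int) (cs : List Char) : List Int :=
  ((PySem.List.enumerate cs k).filter (fun p => p.2 != '0')).map (fun p => p.1)

lemma pvOnes_nil (k : Int) : pvOnes k [] = [] := rfl

lemma pvOnes_cons (k : Int) (c : Char) (r : List Char) :
    pvOnes k (c :: r) = if c ≠ '0' then k :: pvOnes (k + 1) r else pvOnes (k + 1) r := by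
  by_cases h : c = '0' <;> simp [pvOnes, PySem.List.enumerate, h]

lemma pv_foldl_max_init (ys : List Int) : ∀ a b : Int, ys.foldl max (max a b) = max a (ys.foldl max b) := by
  induction ys with
  | nil => intro a b; rfl
  | cons y ys ih => intro a b; simpa [max_assoc] using ih a (max b y)

lemma pv_max?_cons (xs : List Int) : ∀ x : Int, PySem.List.max? (x :: xs) id = some (xs.foldl max x) := by
  induction xs with
  | nil => intro x; rfl
  | cons y ys ih =>
    intro x
    have step : PySem.List.max? (x :: y :: ys) id = PySem.List.max? (max x y :: ys) id := by
      simp only [PySem.List.max?, List.foldl_cons]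
      congr 1
      by_cases h : x < y
      · simp [h, max_eq_right h.le]
      · simp [h, max_eq_left (le_of_not_gt h)]
    rw [step, ih (max x y), List.foldl_cons]

lemma pv_maxD_cons (x : Int) (xs : List Int) (hx : 0 ≤ x) :
    PySem.List.maxD (x :: xs) id 0 = max x (PySem.List.maxD xs id 0) := by
  cases xs with
  | nil =>
    simp [PySem.List.maxD, PySem.List.max?]
    omega
  | cons y ys =>
    simp only [PySem.List.maxD, pv_max?_cons, Option.getD_some, List.foldl_cons]
    exact pv_foldl_max_init ys x y

lemma pv_maxD_nonneg (xs : List Int) (h : ∀ g ∈ xs, 0 ≤ g) : 0 ≤ PySem.List.maxD xs id 0 := by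
  cases xs with
  | nil => simp [PySem.List.maxD, PySem.List.max?]
  | cons x xs =>
    rw [pv_maxD_cons x xs (h x (by simp))]
    have := h x (by simp)
    omega

lemma pvOnes_chain (cs : List Char) : ∀ k p : Int, p < k → List.IsChain (· < ·) (p :: pvOnes k cs) := by
  induction cs with
  | nil => intro k p _; simp [pvOnes_nil]
  | cons c r ih =>
    intro k p hpk
    rw [pvOnes_cons]
    by_cases h : c = '0'
    · simpa [h] using ih (k + 1) p (by omega)
    · rw [if_pos h]
      exact List.isChain_cons_cons.mpr ⟨hpk, ih (k + 1) k (by omega)⟩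

lemma pv_zip_tail_lt : ∀ (L : List Int), List.IsChain (· < ·) L → ∀ q ∈ L.zip L.tail, q.1 < q.2 := by
  intro L
  induction L with
  | nil => intro _ q hq; simp at hq
  | cons a t ih =>
    intro hch q hq
    cases t with
    | nil => simp at hq
    | cons b t' =>
      rw [List.isChain_cons_cons] at hch
      simp only [List.tail_cons, List.zip_cons_cons, List.mem_cons] at hq
      rcases hq with rfl | hq
      · exact hch.1
      · exact ih hch.2 q (by simpa using hq)

-- the gaps list of a prefixed ones list
def pvGaps (L : List Int) : List Int := (L.zip L.tail).map (fun q => q.2 - q.1 - 1)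

-- loop invariant: after a one at position p, with the scan at position k,
-- A's accumulator state is (b, k - p - 1) and finishing the scan yields
-- max b (largest consecutive-position gap of p followed by the remaining ones)
lemma pv_main (cs : List Char) : ∀ (b p k : Int), 0 ≤ b → p < k →
    (cs.foldl pvStepA (b, k - p - 1)).1
      = max b (PySem.List.maxD (pvGaps (p :: pvOnes k cs)) id 0) := by
  induction cs with
  | nil =>
    intro b p k hb _
    simp [pvOnes_nil, pvGaps, PySem.List.maxD, PySem.List.max?]
    omega
  | cons c r ih =>
    intro b p k hb hpk
    rw [pvOnes_cons]
    by_cases h : c = '0'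
    · have hstep : pvStepA (b, k - p - 1) c = (b, (k + 1) - p - 1) := by
        simp [pvStepA, h]; ring
      rw [List.foldl_cons, hstep, ih b p (k + 1) hb (by omega)]
      simp [h]
    · have hstep : pvStepA (b, k - p - 1) c = (max b (k - p - 1), (k + 1) - k - 1) := by
        simp [pvStepA, h]
      rw [List.foldl_cons, hstep, ih (max b (k - p - 1)) k (k + 1) (by omega) (by omega)]
      have hgaps : pvGaps (p :: k :: pvOnes (k + 1) r)
          = (k - p - 1) :: pvGaps (k :: pvOnes (k + 1) r) := by
        simp [pvGaps]
      rw [if_pos h, hgaps, pv_maxD_cons _ _ (by omega)]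
      omega

-- for n > 0 the binary digit string starts with '1'
lemma pv_toDigitsCore_head : ∀ (fuel n : Nat) (ds : List Char), 0 < n → n < fuel →
    ∃ t, Nat.toDigitsCore 2 fuel n ds = '1' :: t := by
  intro fuel
  induction fuel with
  | zero => intro n ds hn hlt; omega
  | succ fuel ih =>
    intro n ds hn hlt
    show ∃ t, (let d := (n % 2).digitChar; let n' := n / 2;
      if n' = 0 then d :: ds else Nat.toDigitsCore 2 fuel n' (d :: ds)) = '1' :: t
    by_cases h : n / 2 = 0
    · have h1 : n = 1 := by omega
      exact ⟨ds, by subst h1; rfl⟩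
    · have := ih (n / 2) ((n % 2).digitChar :: ds) (by omega) (by omega)
      simpa [h] using this

lemma pv_toDigits_head (n : Nat) (hn : 0 < n) : ∃ t, Nat.toDigits 2 n = '1' :: t :=
  pv_toDigitsCore_head (n + 1) n [] hn (by omega)

-- the sliced string bin(N)[2:] starts with a non-'0' char for N ≠ 0
lemma pv_slice_head (N : Int) (hN : N ≠ 0) :
    ∃ d t, PySem.List.slice (PySem.Int.toBinChars0b N) (some 2) none = d :: t ∧ d ≠ '0' := by
  rw [show ((2 : Int)) = ((2 : Nat) : Int) by norm_num, PySem.List.slice_from_natCast]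
  unfold PySem.Int.toBinChars0b
  by_cases hneg : N < 0
  · exact ⟨'b', Nat.toDigits 2 N.natAbs, by simp [hneg, List.drop], by decide⟩
  · obtain ⟨t, ht⟩ := pv_toDigits_head N.toNat (by omega)
    exact ⟨'1', t, by simp [hneg, List.drop, ht], by decide⟩

-- ===== VERDICT =====
theorem solution_chatGPT_spec : Claim_equal_solution_chatGPT := by
  intro N _
  unfold Spec_solution_chatGPT
  by_cases hN : N = 0
  · subst hN; decide
  · obtain ⟨d, t, hs, hd⟩ := pv_slice_head N hN
    unfold solution_chatGPT solution_chatGPT_alt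
    rw [hs]
    have hstep : pvStepA ((0 : Int), (0 : Int)) d = (0, (1 : Int) - 0 - 1) := by
      simp [pvStepA, hd]
    have hones : ((PySem.List.enumerate (d :: t)).filter (fun p => p.2 != '0')).map
        (fun p => p.1) = (0 : Int) :: pvOnes 1 t := by
      have : pvOnes 0 (d :: t) = (0 : Int) :: pvOnes 1 t := by
        rw [pvOnes_cons, if_pos hd]; norm_num
      simpa [pvOnes] using this
    have hchain : List.IsChain (· < ·) ((0 : Int) :: pvOnes 1 t) :=
      pvOnes_chain t 1 0 (by omega)
    have hnn : 0 ≤ PySem.List.maxD (pvGaps ((0 : Int) :: pvOnes 1 t)) id 0 := by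
      apply pv_maxD_nonneg
      intro g hg
      simp only [pvGaps, List.mem_map] at hg
      obtain ⟨q, hq, rfl⟩ := hg
      have := pv_zip_tail_lt _ hchain q hq
      omega
    simp only [List.foldl_cons, hstep, hones]
    rw [pv_main t 0 0 1 (by omega) (by omega)]
    rw [PySem.List.slice_from_one]
    show max 0 _ = PySem.List.maxD (pvGaps ((0 : Int) :: pvOnes 1 t)) id 0
    omega
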